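-- pv_equiv track=rewrite | github.com/JPN514/Online-Learning-and-Related-Projects | Projects/Hurricane analysis using dictionaries.py | calc_max
-- ===== SOURCE A (Python) =====
-- def calc_max(areas):
-- # find most frequently affected area and the number of hurricanes involved in
--   values = sorted(areas.values())
--   max_value = values[-1]
--   max_affected = {}
--   for area in areas:
--     if areas[area] == max_value:
--       max_affected[area] = max_value
--   return(max_affected)
-- ===== SOURCE B (Python) =====
-- def calc_max(areas):
--   # inverted index: value -> list of areas with that value
--   groups = {}
--   for area, value in areas.items():
--     groups.setdefault(value, []).append(area)
--   max_value = sorted(groups)[-1]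
--   return {area: max_value for area in groups[max_value]}
-- ===== Notes on version B (the rewrite author's own statement) =====
-- stated objective: alternative
-- what changed: B builds an inverted index (value -> list of area names) in one pass and then does a single lookup of the maximum value, instead of sorting all values and re-scanning the whole dict filtering on the max.
import Mathlib
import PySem

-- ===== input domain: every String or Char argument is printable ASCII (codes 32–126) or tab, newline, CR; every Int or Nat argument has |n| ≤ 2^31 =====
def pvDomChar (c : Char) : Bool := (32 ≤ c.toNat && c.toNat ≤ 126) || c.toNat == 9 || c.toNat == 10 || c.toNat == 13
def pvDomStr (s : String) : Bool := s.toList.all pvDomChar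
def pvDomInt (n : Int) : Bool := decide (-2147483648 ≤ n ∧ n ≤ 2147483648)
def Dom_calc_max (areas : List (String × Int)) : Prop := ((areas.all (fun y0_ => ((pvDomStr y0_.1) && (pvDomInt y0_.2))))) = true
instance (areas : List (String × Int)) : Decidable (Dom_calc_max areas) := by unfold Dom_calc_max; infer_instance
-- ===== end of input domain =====

-- B replaces A's sort-all-values-then-filter-scan with an inverted index (value -> areas) and a single
-- lookup of the maximum value: a different algorithm of similar cost (objective: alternative).

-- ===== PORT A =====
def calc_max (areas : List (String × Int)) : List (String × Int) :=
  let d := PySem.Dict.ofList areas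
  let values := PySem.List.sorted d.values (fun x => x) false
  match PySem.List.pyGet? values (-1) with
  | none => []   -- Python raises IndexError here (empty dict); excluded by Pre_calc_max
  | some maxValue =>
    (d.keys.foldl (fun (m : PySem.Dict String Int) area =>
        if d.getD area 0 = maxValue then m.insert area maxValue else m)
      PySem.Dict.empty).items

-- ===== PORT B =====
def calc_max_alt (areas : List (String × Int)) : List (String × Int) :=
  let d := PySem.Dict.ofList areas
  let groups := d.items.foldl (fun (g : PySem.Dict Int (List String)) p =>
      g.modify p.2 [] (fun l => l ++ [p.1])) PySem.Dict.empty
  match PySem.List.pyGet? (PySem.List.sorted groups.keys (fun x => x) false) (-1) with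
  | none => []   -- Python raises IndexError here (empty dict); excluded by Pre_calc_max
  | some maxValue => (groups.getD maxValue []).map (fun a => (a, maxValue))

-- ===== PRECONDITION & SPEC =====
-- Pre_ excludes only the empty dict, on which A (and B) raise IndexError.
def Pre_calc_max (areas : List (String × Int)) : Prop := areas ≠ []
instance (areas : List (String × Int)) : Decidable (Pre_calc_max areas) := by unfold Pre_calc_max; infer_instance
def pvWitness_calc_max : (List (String × Int)) := [("a", 2), ("b", 5), ("c", 5)]
def Spec_calc_max (areas : List (String × Int)) (out : List (String × Int)) : Prop := out = calc_max_alt areas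
instance (areas : List (String × Int)) (out : List (String × Int)) : Decidable (Spec_calc_max areas out) := by unfold Spec_calc_max; infer_instance

-- ===== CLAIM (what is proved, stated in full; the proofs are below) =====
def Claim_equal_calc_max : Prop := ∀ (areas : List (String × Int)), Dom_calc_max areas → Pre_calc_max areas → Spec_calc_max areas (calc_max areas)

-- ===== LEMMAS AND PROOFS =====

-- the last element of a Pairwise-(≤) sorted list is a member of, and an upper bound of, the original list
lemma last_sorted_isMax (xs : List Int) (m : Int)
    (h : (PySem.List.sorted xs (fun x => x) false).getLast? = some m) :
    m ∈ xs ∧ ∀ y ∈ xs, y ≤ m := by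
  have hm : m ∈ PySem.List.sorted xs (fun x => x) false := List.mem_of_getLast? h
  refine ⟨(PySem.List.mem_sorted xs (fun x => x) false m).1 hm, ?_⟩
  intro y hy
  have hys : y ∈ PySem.List.sorted xs (fun x => x) false :=
    (PySem.List.mem_sorted xs (fun x => x) false y).2 hy
  obtain ⟨p, hp, hype⟩ := List.mem_iff_getElem.mp hys
  rw [List.getLast?_eq_getElem?] at h
  have hlast : (PySem.List.sorted xs (fun x => x) false).length - 1 <
      (PySem.List.sorted xs (fun x => x) false).length := by omega
  rw [List.getElem?_eq_getElem hlast] at h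
  have hme : (PySem.List.sorted xs (fun x => x) false)[(PySem.List.sorted xs (fun x => x) false).length - 1] = m := by
    exact Option.some.inj h
  have := PySem.List.sorted_id_getElem_mono xs (p := p)
    (q := (PySem.List.sorted xs (fun x => x) false).length - 1) (by omega) hlast
  rw [hype, hme] at this
  exact this

-- two lists with the same members have the same last element after sorting
lemma last_sorted_congr (xs ys : List Int) (hx : xs ≠ [])
    (h : ∀ a, a ∈ xs ↔ a ∈ ys) :
    (PySem.List.sorted xs (fun x => x) false).getLast? =
    (PySem.List.sorted ys (fun x => x) false).getLast? := by
  have hsx : PySem.List.sorted xs (fun x => x) false ≠ [] := by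
    simpa [PySem.List.sorted_eq_nil_iff] using hx
  have hy : ys ≠ [] := by
    obtain ⟨a, ha⟩ := List.exists_mem_of_ne_nil xs hx
    exact List.ne_nil_of_mem ((h a).1 ha)
  have hsy : PySem.List.sorted ys (fun x => x) false ≠ [] := by
    simpa [PySem.List.sorted_eq_nil_iff] using hy
  obtain ⟨m1, hm1⟩ := Option.isSome_iff_exists.mp (List.getLast?_isSome.mpr hsx)
  obtain ⟨m2, hm2⟩ := Option.isSome_iff_exists.mp (List.getLast?_isSome.mpr hsy)
  obtain ⟨hmem1, hub1⟩ := last_sorted_isMax xs m1 hm1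
  obtain ⟨hmem2, hub2⟩ := last_sorted_isMax ys m2 hm2
  have h12 : m1 ≤ m2 := hub2 m1 ((h m1).1 hmem1)
  have h21 : m2 ≤ m1 := hub1 m2 ((h m2).2 hmem2)
  rw [hm1, hm2, le_antisymm h12 h21]

-- A's conditional-insert loop over fresh distinct keys collects the matching pairs
lemma foldl_condInsert (d : PySem.Dict String Int) (mv : Int) (ks : List String)
    (m : PySem.Dict String Int) (hnd : ks.Nodup)
    (hfresh : ∀ k ∈ ks, m.contains k = false) :
    (ks.foldl (fun m area => if d.getD area 0 = mv then m.insert area mv else m) m).items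
      = m.items ++ (ks.filter (fun k => d.getD k 0 = mv)).map (fun k => (k, mv)) := by
  induction ks generalizing m with
  | nil => simp
  | cons k t ih =>
    have hkf : m.contains k = false := hfresh k (by simp)
    have hnd' : t.Nodup := hnd.of_cons
    by_cases hc : d.getD k 0 = mv
    · have hfresh' : ∀ k' ∈ t, (m.insert k mv).contains k' = false := by
        intro k' hk'
        rw [PySem.Dict.contains_insert]
        have hne : k' ≠ k := by
          intro he; exact (List.nodup_cons.mp hnd).1 (he ▸ hk')
        simp [hne, hfresh k' (List.mem_cons_of_mem _ hk')]
      rw [List.foldl_cons, if_pos hc, ih (m.insert k mv) hnd' hfresh',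
        PySem.Dict.items_insert_of_not_contains m mv hkf]
      simp [hc]
    · have hfresh' : ∀ k' ∈ t, m.contains k' = false := fun k' hk' =>
        hfresh k' (List.mem_cons_of_mem _ hk')
      rw [List.foldl_cons, if_neg hc, ih m hnd' hfresh']
      simp [hc]

theorem calc_max_spec : Claim_equal_calc_max := by
  intro areas _hdom hpre
  unfold Spec_calc_max calc_max calc_max_alt
  simp only []
  set d := PySem.Dict.ofList areas with hd
  have hnd : d.keys.Nodup := PySem.Dict.nodup_keys_ofList areas
  -- keys of the ofList dict
  have hkeys : d.keys = PySem.Set.ofList (areas.map (fun p => p.1)) := by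
    have : d.keys = PySem.Set.update PySem.Dict.empty.keys (areas.map (fun p => p.1)) :=
      PySem.Dict.keys_foldl_insert_key areas (fun p => p.1) (fun _ p => p.2) PySem.Dict.empty
    simpa [PySem.Set.update_nil_left] using this
  -- the dict is nonempty
  have hkne : d.keys ≠ [] := by
    obtain ⟨p, t, rfl⟩ := List.exists_cons_of_ne_nil hpre
    intro h0
    have : p.1 ∈ d.keys := by
      rw [hkeys]; exact (PySem.Set.mem_ofList _ _).2 (by simp)
    simp [h0] at this
  have hvne : d.values ≠ [] := by
    intro h0
    apply hkne
    have : d.items = [] := by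
      cases hit : d.items with
      | nil => rfl
      | cons a b => rw [PySem.Dict.values, hit] at h0; simp at h0
    rw [PySem.Dict.keys, this]; rfl
  -- the groups dict of B
  set groups := d.items.foldl (fun (g : PySem.Dict Int (List String)) p =>
      g.modify p.2 [] (fun l => l ++ [p.1])) PySem.Dict.empty with hg
  have hgkeys : groups.keys = PySem.Set.ofList (d.items.map (fun p => p.2)) := by
    have : groups.keys = PySem.Set.update PySem.Dict.empty.keys (d.items.map (fun p => p.2)) :=
      PySem.Dict.keys_foldl_modify_key d.items (fun p => p.2) [] (fun _ p l => l ++ [p.1]) PySem.Dict.empty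
    simpa [PySem.Set.update_nil_left] using this
  -- both scrutinees are the same maximum
  have hsame : PySem.List.pyGet? (PySem.List.sorted d.values (fun x => x) false) (-1)
      = PySem.List.pyGet? (PySem.List.sorted groups.keys (fun x => x) false) (-1) := by
    rw [PySem.List.pyGet?_neg_one, PySem.List.pyGet?_neg_one]
    apply last_sorted_congr _ _ hvne
    intro a
    rw [hgkeys, PySem.Set.mem_ofList]
    simp [PySem.Dict.values]
  rw [← hsame]
  cases hmax : PySem.List.pyGet? (PySem.List.sorted d.values (fun x => x) false) (-1) with
  | none => rfl
  | some mv =>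
    dsimp only
    -- A side: collect matching keys
    rw [foldl_condInsert d mv d.keys PySem.Dict.empty hnd (by simp)]
    -- B side: the group of the maximum value
    have hb : groups.getD mv [] = (d.items.filter (fun p => p.2 == mv)).map (fun p => p.1) := by
      rw [hg]
      have h1 : (d.items.foldl (fun (g : PySem.Dict Int (List String)) p =>
            g.modify p.2 [] (fun l => l ++ [p.1])) PySem.Dict.empty)
          = ((d.items.map Prod.swap).foldl (fun (g : PySem.Dict Int (List String)) p =>
            g.modify p.1 [] (fun l => l ++ [p.2])) PySem.Dict.empty) := (List.foldl_map (f := Prod.swap)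
            (g := fun (g : PySem.Dict Int (List String)) (p : Int × String) =>
              g.modify p.1 [] (fun l => l ++ [p.2]))).symm
      rw [h1, PySem.Dict.getD_foldl_modify_append]
      simp [List.filter_map, List.map_map, Function.comp_def, Prod.swap]
    rw [hb]
    -- align the two filters
    have hkitems : d.keys = d.items.map (fun p => p.1) := rfl
    rw [hkitems, List.filter_map]
    have hfc : d.items.filter ((fun k => decide (d.getD k 0 = mv)) ∘ (fun p => p.1))
        = d.items.filter (fun p => p.2 == mv) := by
      apply List.filter_congr
      intro p hp
      have : d.getD p.1 0 = p.2 := PySem.Dict.getD_of_mem_items d hp hnd 0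
      simp only [Function.comp_apply, this]
      rw [Bool.eq_iff_iff]
      simp [beq_iff_eq]
    rw [hfc]
    simp [List.map_map, Function.comp_def]
    rfl
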